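-- pv_equiv track=rewrite | github.com/Valid8-security/valid8-binaries | parry/ai_detector.py | _get_cwe_category
-- ===== SOURCE A (Python) =====
-- def _get_cwe_category(cwe: str) -> str:
--     """Map CWE to category for specialized model selection"""
--     cwe_mappings = {
--         'injection': ['CWE-89', 'CWE-78', 'CWE-79', 'CWE-94', 'CWE-652', 'CWE-917'],
--         'auth': ['CWE-287', 'CWE-306', 'CWE-640', 'CWE-798', 'CWE-645', 'CWE-620', 'CWE-549'],
--         'crypto': ['CWE-327', 'CWE-328', 'CWE-331', 'CWE-329', 'CWE-338'],
--         'general': ['CWE-20', 'CWE-457', 'CWE-476', 'CWE-502', 'CWE-732', 'CWE-266', 'CWE-274']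
--     }
--
--     for category, cwes in cwe_mappings.items():
--         if cwe in cwes:
--             return category
--
--     return 'general'  # Default category
-- ===== SOURCE B (Python) =====
-- # Sorted (cwe, category) table + hand-written binary search instead of scanning
-- # per-category membership lists.
-- _SORTED_PAIRS = [
--     ('CWE-20', 'general'), ('CWE-266', 'general'), ('CWE-274', 'general'),
--     ('CWE-287', 'auth'), ('CWE-306', 'auth'), ('CWE-327', 'crypto'),
--     ('CWE-328', 'crypto'), ('CWE-329', 'crypto'), ('CWE-331', 'crypto'),
--     ('CWE-338', 'crypto'), ('CWE-457', 'general'), ('CWE-476', 'general'),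
--     ('CWE-502', 'general'), ('CWE-549', 'auth'), ('CWE-620', 'auth'),
--     ('CWE-640', 'auth'), ('CWE-645', 'auth'), ('CWE-652', 'injection'),
--     ('CWE-732', 'general'), ('CWE-78', 'injection'), ('CWE-79', 'injection'),
--     ('CWE-798', 'auth'), ('CWE-89', 'injection'), ('CWE-917', 'injection'),
--     ('CWE-94', 'injection'),
-- ]
--
-- def _get_cwe_category(cwe: str) -> str:
--     """Map CWE to category for specialized model selection"""
--     lo, hi = 0, len(_SORTED_PAIRS)
--     while lo < hi:
--         mid = (lo + hi) // 2
--         if _SORTED_PAIRS[mid][0] < cwe: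
--             lo = mid + 1
--         else:
--             hi = mid
--     if lo < len(_SORTED_PAIRS) and _SORTED_PAIRS[lo][0] == cwe:
--         return _SORTED_PAIRS[lo][1]
--     return 'general'
-- ===== Notes on version B (the rewrite author's own statement) =====
-- stated objective: alternative
-- what changed: Replaces A's loop over four category-to-list mappings with inner membership scans by a hand-written binary search over one sorted (cwe, category) table, returning the default category on a miss.
import Mathlib
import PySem

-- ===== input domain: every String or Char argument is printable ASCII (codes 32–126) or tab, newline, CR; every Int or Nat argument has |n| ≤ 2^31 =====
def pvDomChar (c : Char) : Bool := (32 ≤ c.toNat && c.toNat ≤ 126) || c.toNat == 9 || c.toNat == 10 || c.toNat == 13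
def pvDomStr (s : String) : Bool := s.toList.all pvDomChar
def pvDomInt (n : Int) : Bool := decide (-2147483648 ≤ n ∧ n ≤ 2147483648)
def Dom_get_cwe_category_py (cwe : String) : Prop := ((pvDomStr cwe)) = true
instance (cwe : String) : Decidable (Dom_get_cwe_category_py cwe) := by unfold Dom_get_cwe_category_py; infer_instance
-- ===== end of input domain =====

-- B replaces A's scan over four category membership lists by binary search in one
-- sorted (cwe, category) table with the default category on a miss (alternative).

-- ===== PORT A =====
-- the cwe_mappings dict of A, as an insertion-ordered association list
def pvCweMappings : List (String × List String) :=
  [("injection", ["CWE-89", "CWE-78", "CWE-79", "CWE-94", "CWE-652", "CWE-917"]),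
   ("auth", ["CWE-287", "CWE-306", "CWE-640", "CWE-798", "CWE-645", "CWE-620", "CWE-549"]),
   ("crypto", ["CWE-327", "CWE-328", "CWE-331", "CWE-329", "CWE-338"]),
   ("general", ["CWE-20", "CWE-457", "CWE-476", "CWE-502", "CWE-732", "CWE-266", "CWE-274"])]

-- the 'for category, cwes in cwe_mappings.items(): if cwe in cwes: return category' loop
def pvScanLoop (cwe : String) : List (String × List String) → String
  | [] => "general"   -- default category after the loop
  | (category, cwes) :: rest => if cwes.contains cwe then category else pvScanLoop cwe rest

def get_cwe_category_py (cwe : String) : String := pvScanLoop cwe pvCweMappings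

-- ===== PORT B =====
-- the module-level sorted table _SORTED_PAIRS of Source B
def pvSortedPairs : List (String × String) :=
  [("CWE-20", "general"), ("CWE-266", "general"), ("CWE-274", "general"),
   ("CWE-287", "auth"), ("CWE-306", "auth"), ("CWE-327", "crypto"),
   ("CWE-328", "crypto"), ("CWE-329", "crypto"), ("CWE-331", "crypto"),
   ("CWE-338", "crypto"), ("CWE-457", "general"), ("CWE-476", "general"),
   ("CWE-502", "general"), ("CWE-549", "auth"), ("CWE-620", "auth"),
   ("CWE-640", "auth"), ("CWE-645", "auth"), ("CWE-652", "injection"),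
   ("CWE-732", "general"), ("CWE-78", "injection"), ("CWE-79", "injection"),
   ("CWE-798", "auth"), ("CWE-89", "injection"), ("CWE-917", "injection"),
   ("CWE-94", "injection")]

-- Source B's 'while lo < hi' binary-search loop; lo/hi are nonnegative indices, so Nat
-- and Nat division coincide with Python's int and '//' here; 'fuel' only makes the
-- loop structurally recursive (hi - lo strictly decreases, so fuel = length suffices).
-- String '<' in Lean is lexicographic on code points, exactly Python's str '<'.
def pvBSearch (cwe : String) : Nat → Nat → Nat → Nat
  | 0, lo, _ => lo
  | fuel + 1, lo, hi =>
    if lo < hi then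
      let mid := (lo + hi) / 2
      if (pvSortedPairs.getD mid ("", "")).1 < cwe then pvBSearch cwe fuel (mid + 1) hi
      else pvBSearch cwe fuel lo mid
    else lo

def get_cwe_category_py_alt (cwe : String) : String :=
  let lo := pvBSearch cwe pvSortedPairs.length 0 pvSortedPairs.length
  if lo < pvSortedPairs.length && (pvSortedPairs.getD lo ("", "")).1 == cwe then
    (pvSortedPairs.getD lo ("", "")).2
  else "general"

-- ===== PRECONDITION & SPEC =====
def Spec_get_cwe_category_py (cwe : String) (out : String) : Prop := out = get_cwe_category_py_alt cwe
instance (cwe : String) (out : String) : Decidable (Spec_get_cwe_category_py cwe out) := by unfold Spec_get_cwe_category_py; infer_instance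

-- ===== CLAIM (what is proved, stated in full; the proofs are below) =====
def Claim_equal_get_cwe_category_py : Prop := ∀ (cwe : String), Dom_get_cwe_category_py cwe → Spec_get_cwe_category_py cwe (get_cwe_category_py cwe)

-- ===== LEMMAS AND PROOFS =====

-- any entry the final check can compare against cwe is one of the 25 table keys
theorem pvSortedPairs_key_mem (i : Nat) (h : i < pvSortedPairs.length) :
    (pvSortedPairs.getD i ("", "")).1 ∈ pvSortedPairs.map Prod.fst := by
  rw [List.getD_eq_getElem _ _ h]
  exact List.mem_map_of_mem (List.getElem_mem h)

-- if cwe is none of the 25 keys, B's final equality check fails, so B returns "general"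
theorem alt_not_mem (cwe : String) (hm : cwe ∉ pvSortedPairs.map Prod.fst) :
    get_cwe_category_py_alt cwe = "general" := by
  unfold get_cwe_category_py_alt
  set lo := pvBSearch cwe pvSortedPairs.length 0 pvSortedPairs.length with hlo
  by_cases h : lo < pvSortedPairs.length
  · have hne : (pvSortedPairs.getD lo ("", "")).1 ≠ cwe := by
      intro he; exact hm (he ▸ pvSortedPairs_key_mem lo h)
    rw [List.getD_eq_getElem _ _ h] at hne
    simp [h, hne]
  · simp [h]

-- if cwe is none of the 25 keys, every 'cwe in cwes' test of A's loop fails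
theorem scan_not_mem (cwe : String) (hm : cwe ∉ pvSortedPairs.map Prod.fst) :
    get_cwe_category_py cwe = "general" := by
  simp only [pvSortedPairs, List.map_cons, List.map_nil, List.mem_cons, List.not_mem_nil,
    or_false, not_or] at hm
  obtain ⟨h1, h2, h3, h4, h5, h6, h7, h8, h9, h10, h11, h12, h13, h14, h15, h16, h17, h18,
    h19, h20, h21, h22, h23, h24, h25⟩ := hm
  simp [get_cwe_category_py, pvCweMappings, pvScanLoop,
    h1, h2, h3, h4, h5, h6, h7, h8, h9, h10, h11, h12, h13, h14, h15, h16, h17, h18,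
    h19, h20, h21, h22, h23, h24, h25]

-- ===== VERDICT (by name: the statement is the Claim_ definition above) =====
set_option maxHeartbeats 1000000 in
theorem get_cwe_category_py_spec : Claim_equal_get_cwe_category_py := by
  intro cwe _
  unfold Spec_get_cwe_category_py
  by_cases hm : cwe ∈ pvSortedPairs.map Prod.fst
  · -- the 25 table keys: both sides evaluate
    simp only [pvSortedPairs, List.map_cons, List.map_nil, List.mem_cons,
      List.not_mem_nil, or_false] at hm
    rcases hm with rfl|rfl|rfl|rfl|rfl|rfl|rfl|rfl|rfl|rfl|rfl|rfl|rfl|rfl|rfl|rfl|rfl|rfl|rfl|rfl|rfl|rfl|rfl|rfl|rfl <;>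
      (simp [get_cwe_category_py, get_cwe_category_py_alt, pvScanLoop, pvCweMappings,
        pvBSearch, pvSortedPairs, String.lt_iff_toList_lt]; decide)
  · rw [alt_not_mem cwe hm, scan_not_mem cwe hm]
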